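-- pv_equiv track=rewrite | github.com/factly/gopie | server/app/utils/correct_column_values.py | find_closest_column_names
-- ===== SOURCE A (Python) =====
-- DEFAULT_MAX_DISTANCE = 10
--
-- def levenshtein_distance(str1: str, str2: str) -> int:
--     """
--     Calculate the Levenshtein distance between two strings using a
--     memory-efficient approach.
--
--     Args:
--         str1: First string to compare
--         str2: Second string to compare
--
--     Returns:
--         The edit distance between the two strings
--     """
--     m = len(str1)
--     n = len(str2)
--
--     prev_row = list(range(n + 1))
--     curr_row = [0] * (n + 1)
--
--     for i in range(1, m + 1):
--         curr_row[0] = i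
--
--         for j in range(1, n + 1):
--             if str1[i - 1] == str2[j - 1]:
--                 curr_row[j] = prev_row[j - 1]
--             else:
--                 curr_row[j] = 1 + min(
--                     curr_row[j - 1],
--                     prev_row[j],
--                     prev_row[j - 1],
--                 )
--
--         prev_row = curr_row.copy()
--
--     return curr_row[n]
--
-- def find_closest_column_names(
--     column_name: str,
--     df_columns: list[str],
--     max_distance: int = DEFAULT_MAX_DISTANCE,
-- ) -> list[str]:
--     """
--     Find closest matches for a column name in the dataframe columns using
--     Levenshtein distance.
--
--     Args:
--         column_name: The column name to match
--         df_columns: List of actual column names in the dataframe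
--         max_distance: Maximum allowed Levenshtein distance for suggestions
--
--     Returns:
--         List of closest column name matches
--     """
--     distance_map = {}
--     for col in df_columns:
--         distance = levenshtein_distance(column_name.lower(), col.lower())
--         distance_map[col] = distance
--
--     suggestions = [
--         col for col, dist in distance_map.items() if dist <= max_distance
--     ]
--     suggestions.sort(key=lambda x: distance_map[x])
--
--     return suggestions
-- ===== SOURCE B (Python) =====
-- DEFAULT_MAX_DISTANCE = 10
--
--
-- def _banded_distance(s, t, k):
--     """Thresholded (banded) Levenshtein: the distance if it is <= k, else None.
--
--     Cells with |i - j| > k cannot lie on an edit path of cost <= k (the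
--     distance is at least |i - j|), so they are not computed: they are given
--     the sentinel big = k + 1, which also caps every value that only matters
--     as "already too far".  A length prefilter rejects a pair outright when
--     even |len(s) - len(t)| exceeds k.
--     """
--     m, n = len(s), len(t)
--     if abs(m - n) > k:
--         return None
--     big = k + 1
--     row = [min(j, big) for j in range(n + 1)]
--     for i, c1 in enumerate(s, 1):
--         prev = row
--         row = [i if i <= k else big]
--         for j, c2 in enumerate(t, 1):
--             if abs(i - j) > k:
--                 row.append(big)
--             elif c1 == c2:
--                 row.append(prev[j - 1])
--             else:
--                 row.append(1 + min(row[-1], prev[j], prev[j - 1]))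
--     d = row[n]
--     return d if d <= k else None
--
--
-- def find_closest_column_names(
--     column_name,
--     df_columns,
--     max_distance=DEFAULT_MAX_DISTANCE,
-- ):
--     target = column_name.lower()
--     buckets = {}
--     for col in dict.fromkeys(df_columns):
--         d = _banded_distance(target, col.lower(), max_distance)
--         if d is not None:
--             buckets.setdefault(d, []).append(col)
--     result = []
--     for d in sorted(buckets):
--         result += buckets[d]
--     return result
-- ===== Notes on version B (the rewrite author's own statement) =====
-- stated objective: faster
-- what changed: B replaces A's pipeline (full two-row Levenshtein DP for every column, dict of all distances, filter, stable sort keyed by dict lookup) with a thresholded/banded Levenshtein (length prefilter |len(s)-len(t)|>k rejects a column with no DP at all; DP cells outside the |i-j|<=k band are never computed, only assigned the sentinel k+1) and collects survivors into distance buckets which are concatenated in ascending key order instead of sorting the columns.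
-- intended difference: When column_name is empty A's DP loop never runs and reports distance 0 for every column, so (for max_distance >= 0) A returns all distinct columns in their original order; B reports the true distance len(col), filters out columns longer than max_distance and orders by length, which is the intended behaviour. — e.g. on find_closest_column_names("", ["ab"], 0): A returns ["ab"], B returns []
import Mathlib
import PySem

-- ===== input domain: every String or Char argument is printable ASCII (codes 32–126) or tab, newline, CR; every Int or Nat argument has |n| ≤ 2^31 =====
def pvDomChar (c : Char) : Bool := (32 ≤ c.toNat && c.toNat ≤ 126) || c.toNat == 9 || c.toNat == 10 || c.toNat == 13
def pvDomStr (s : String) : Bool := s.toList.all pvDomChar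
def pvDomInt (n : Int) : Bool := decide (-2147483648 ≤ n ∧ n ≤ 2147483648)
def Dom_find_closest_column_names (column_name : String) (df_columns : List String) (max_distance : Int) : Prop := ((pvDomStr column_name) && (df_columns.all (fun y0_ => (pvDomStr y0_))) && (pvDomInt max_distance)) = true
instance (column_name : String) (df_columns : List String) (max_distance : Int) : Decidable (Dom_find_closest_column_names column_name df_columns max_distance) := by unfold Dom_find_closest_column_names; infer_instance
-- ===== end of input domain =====

-- B replaces A's pipeline (full two-row Levenshtein DP for every column, dict of all
-- distances, filter, stable sort keyed by dict lookup) with a thresholded/banded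
-- Levenshtein (length prefilter, DP cells outside the |i-j| ≤ k band are only assigned
-- the sentinel k+1, never computed) whose survivors are collected into distance buckets
-- concatenated in ascending key order instead of sorting the columns; B fixes A's
-- empty-column_name corner (A's DP loop never runs there and reports distance 0 for
-- every column).

-- ===== PORT A =====
-- helper: levenshtein_distance of Source A (two-row DP over int indices; strings read as char lists)
def levenshtein_distance (str1 str2 : String) : Int :=
  let s1 := str1.toList
  let s2 := str2.toList
  let m : Int := s1.length
  let n : Int := s2.length
  let prev0 : List Int := PySem.List.pyRange 0 (n + 1) 1
  let curr0 : List Int := List.replicate (n + 1).toNat 0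
  let st := (PySem.List.pyRange 1 (m + 1) 1).foldl (fun (pc : List Int × List Int) i =>
    let prev := pc.1
    let curr := PySem.List.pySetD pc.2 0 i
    let curr := (PySem.List.pyRange 1 (n + 1) 1).foldl (fun curr j =>
      if PySem.List.pyGetD s1 (i - 1) ' ' = PySem.List.pyGetD s2 (j - 1) ' ' then
        PySem.List.pySetD curr j (PySem.List.pyGetD prev (j - 1) 0)
      else
        PySem.List.pySetD curr j (1 + min (PySem.List.pyGetD curr (j - 1) 0)
          (min (PySem.List.pyGetD prev j 0) (PySem.List.pyGetD prev (j - 1) 0)))) curr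
    (curr, curr)) (prev0, curr0)
  PySem.List.pyGetD st.2 n 0
  -- indexing str1[i-1]/str2[j-1], prev_row[..], curr_row[..] is always in range in the Python,
  -- so the total pyGetD/pySetD forms are exact here

def find_closest_column_names (column_name : String) (df_columns : List String) (max_distance : Int) : List String :=
  let dm := df_columns.foldl (fun d col =>
    d.insert col (levenshtein_distance (PySem.Str.lower column_name) (PySem.Str.lower col)))
    PySem.Dict.empty
  let suggestions := (dm.items.filter (fun p => p.2 ≤ max_distance)).map (fun p => p.1)
  PySem.List.sorted suggestions (fun x => dm.getD x 0) false
  -- distance_map[x] in the sort key always hits an existing key, so getD is exact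

-- ===== PORT B =====
-- helper: Source B's inner `for j, c2 in enumerate(t, 1)` loop: prev[j-1] = diag, prev[j] = up,
-- row[-1] = last; Python's abs(i-j) is ported exactly as the cast of Int.natAbs
def bandInner (k : Int) (c1 : Char) (i : Int) : List Char → Int → List Int → Int → List Int
  | c2 :: ts, j, diag :: up :: rest, last =>
      let v := if k < ((i - j).natAbs : Int) then k + 1
               else if c1 = c2 then diag
               else 1 + min last (min up diag)
      v :: bandInner k c1 i ts (j + 1) (up :: rest) v
  | _, _, _, _ => []

-- helper: one row of Source B (`row = [i if i <= k else big]` then the enumerate loop)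
def bandStep (k : Int) (c1 : Char) (i : Int) (t : List Char) (prev : List Int) : List Int :=
  let h := if i ≤ k then i else k + 1
  h :: bandInner k c1 i t 1 prev h

-- helper: Source B's outer `for i, c1 in enumerate(s, 1)` loop
def bandLoop (k : Int) (t : List Char) : List Char → Int → List Int → List Int
  | [], _, row => row
  | c1 :: s, i, row => bandLoop k t s (i + 1) (bandStep k c1 i t row)

-- helper: _banded_distance of Source B (row[n] is always in range, so pyGetD is exact)
def bandedDistance (s t : List Char) (k : Int) : Option Int :=
  if k < (((s.length : Int) - (t.length : Int)).natAbs : Int) then none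
  else
    let row := bandLoop k t s 1
      ((PySem.List.pyRange 0 ((t.length : Int) + 1) 1).map (fun j => min j (k + 1)))
    let d := PySem.List.pyGetD row ((t.length : Nat) : Int) 0
    if d ≤ k then some d else none

-- dict.fromkeys(df_columns) is PySem.List.dedup; buckets.setdefault(d, []).append(col) is
-- Dict.modify d [] (· ++ [col]); `for d in sorted(buckets): result += buckets[d]` is the
-- final fold over the sorted keys (buckets[d] always hits an existing key, so getD is exact)
def find_closest_column_names_alt (column_name : String) (df_columns : List String) (max_distance : Int) : List String :=
  let target := PySem.Str.lower column_name
  let buckets := (PySem.List.dedup df_columns).foldl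
    (fun (b : PySem.Dict Int (List String)) col =>
      match bandedDistance target.toList (PySem.Str.lower col).toList max_distance with
      | some d => b.modify d [] (fun l => l ++ [col])
      | none => b) PySem.Dict.empty
  (PySem.List.sorted buckets.keys (fun x => x) false).foldl (fun res d => res ++ buckets.getD d []) []

-- ===== PRECONDITION & SPEC =====
-- When column_name is empty, A's DP loop never runs and reports distance 0 for every column, so
-- (for max_distance ≥ 0) A returns all distinct columns in original order; B reports the true
-- distance len(col), filters out columns longer than max_distance and sorts by length, which is
-- the intended behaviour. D_ holds exactly where those two results differ.
def D_find_closest_column_names (column_name : String) (df_columns : List String) (max_distance : Int) : Prop :=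
  column_name = "" ∧ 0 ≤ max_distance ∧
    ¬(((PySem.List.dedup df_columns).all
         (fun c => decide ((c.toList.length : Int) ≤ max_distance))) = true ∧
      (PySem.List.dedup df_columns).Pairwise (fun a b => a.toList.length ≤ b.toList.length))

instance (column_name : String) (df_columns : List String) (max_distance : Int) : Decidable (D_find_closest_column_names column_name df_columns max_distance) := by unfold D_find_closest_column_names; infer_instance

def Spec_find_closest_column_names (column_name : String) (df_columns : List String) (max_distance : Int) (out : List String) : Prop := ¬ D_find_closest_column_names column_name df_columns max_distance → out = find_closest_column_names_alt column_name df_columns max_distance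
instance (column_name : String) (df_columns : List String) (max_distance : Int) (out : List String) : Decidable (Spec_find_closest_column_names column_name df_columns max_distance out) := by unfold Spec_find_closest_column_names; infer_instance

def pvDiffWitness_find_closest_column_names : String × List String × Int := ("", ["ab"], 0)
def pvDiffWitnessOut_find_closest_column_names : (List String) × (List String) := (["ab"], [])

-- ===== CLAIM (what is proved, stated in full; the proofs are below) =====
def Claim_unchanged_find_closest_column_names : Prop := ∀ (column_name : String) (df_columns : List String) (max_distance : Int), Dom_find_closest_column_names column_name df_columns max_distance → Spec_find_closest_column_names column_name df_columns max_distance (find_closest_column_names column_name df_columns max_distance)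
def Claim_changed_find_closest_column_names : Prop := Dom_find_closest_column_names (pvDiffWitness_find_closest_column_names.1) (pvDiffWitness_find_closest_column_names.2.1) (pvDiffWitness_find_closest_column_names.2.2) ∧ D_find_closest_column_names (pvDiffWitness_find_closest_column_names.1) (pvDiffWitness_find_closest_column_names.2.1) (pvDiffWitness_find_closest_column_names.2.2) ∧ find_closest_column_names (pvDiffWitness_find_closest_column_names.1) (pvDiffWitness_find_closest_column_names.2.1) (pvDiffWitness_find_closest_column_names.2.2) = pvDiffWitnessOut_find_closest_column_names.1 ∧ find_closest_column_names_alt (pvDiffWitness_find_closest_column_names.1) (pvDiffWitness_find_closest_column_names.2.1) (pvDiffWitness_find_closest_column_names.2.2) = pvDiffWitnessOut_find_closest_column_names.2 ∧ pvDiffWitnessOut_find_closest_column_names.1 ≠ pvDiffWitnessOut_find_closest_column_names.2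
def Claim_exact_find_closest_column_names : Prop := ∀ (column_name : String) (df_columns : List String) (max_distance : Int), Dom_find_closest_column_names column_name df_columns max_distance → D_find_closest_column_names column_name df_columns max_distance → find_closest_column_names column_name df_columns max_distance ≠ find_closest_column_names_alt column_name df_columns max_distance

-- ===== LEMMAS AND PROOFS =====

-- ---- functional model of the full (unbanded) DP: the row after consuming a prefix of s ----
def bInner (c1 : Char) : List Char → List Int → Int → List Int
  | c2 :: ts, diag :: up :: rest, last =>
      let v := if c1 = c2 then diag else 1 + min last (min up diag)
      v :: bInner c1 ts (up :: rest) v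
  | _, _, _ => []

def bStep (c1 : Char) (t : List Char) (prev : List Int) : List Int :=
  (prev.headD 0 + 1) :: bInner c1 t prev (prev.headD 0 + 1)

def frow (s t : List Char) : List Int :=
  s.foldl (fun r c => bStep c t r) (PySem.List.pyRange 0 ((t.length : Int) + 1) 1)

lemma bInner_length (c1 : Char) : ∀ (ts : List Char) (rr : List Int) (last : Int),
    rr.length = ts.length + 1 → (bInner c1 ts rr last).length = ts.length := by
  intro ts
  induction ts with
  | nil => intro rr last _; cases rr with | nil => simp [bInner] | cons a r => cases r <;> simp_all [bInner]
  | cons c2 ts ih =>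
    intro rr last h
    match rr with
    | d :: u :: rest => simp [bInner]; exact ih (u :: rest) _ (by simpa using h)

lemma bStep_length (c1 : Char) (t : List Char) (prev : List Int)
    (h : prev.length = t.length + 1) : (bStep c1 t prev).length = t.length + 1 := by
  simp [bStep, bInner_length c1 t prev _ h]

lemma foldl_bStep_length (t : List Char) : ∀ (s : List Char) (r : List Int),
    r.length = t.length + 1 → (s.foldl (fun r c => bStep c t r) r).length = t.length + 1 := by
  intro s
  induction s with
  | nil => intro r h; simpa using h
  | cons c s ih => intro r h; simpa using ih _ (bStep_length c t r h)

lemma frow_length (s t : List Char) : (frow s t).length = t.length + 1 := by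
  apply foldl_bStep_length
  simp [PySem.List.length_pyRange_one]

lemma foldl_bStep_headD (t : List Char) : ∀ (s : List Char) (r : List Int),
    ((s.foldl (fun r c => bStep c t r) r)).headD 0 = r.headD 0 + s.length := by
  intro s
  induction s with
  | nil => intro r; simp
  | cons c s ih => intro r; rw [List.foldl_cons, ih]; simp [bStep]; ring

lemma frow_headD (s t : List Char) : (frow s t).headD 0 = s.length := by
  unfold frow
  rw [foldl_bStep_headD]
  have : (0:Int) < (t.length : Int) + 1 := by positivity
  rw [PySem.List.pyRange_one_cons this]
  simp

lemma frow_take_succ (s t : List Char) (k : Nat) (hk : k < s.length) :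
    frow (s.take (k+1)) t = bStep s[k] t (frow (s.take k) t) := by
  have h1 : s.take (k+1) = s.take k ++ [s[k]] := by
    rw [List.take_add_one, List.getElem?_eq_getElem hk]; simp
  unfold frow
  rw [h1, List.foldl_append]
  simp

-- ---- A's inner loop computes bInner ----
lemma innerA_gen (c : Char) (s1 s2 : List Char) (i : Int) (prev : List Int)
    (hc : PySem.List.pyGetD s1 (i - 1) ' ' = c) (hp : prev.length = s2.length + 1) :
    ∀ (fuel j0 : Nat) (done rest : List Int) (v : Int),
      fuel = s2.length - j0 → j0 ≤ s2.length →
      done.length = j0 + 1 → rest.length = s2.length - j0 → done.getLast? = some v →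
      (PySem.List.pyRange ((j0 : Int) + 1) ((s2.length : Int) + 1) 1).foldl
        (fun curr j =>
          if PySem.List.pyGetD s1 (i - 1) ' ' = PySem.List.pyGetD s2 (j - 1) ' ' then
            PySem.List.pySetD curr j (PySem.List.pyGetD prev (j - 1) 0)
          else
            PySem.List.pySetD curr j (1 + min (PySem.List.pyGetD curr (j - 1) 0)
              (min (PySem.List.pyGetD prev j 0) (PySem.List.pyGetD prev (j - 1) 0))))
        (done ++ rest)
      = done ++ bInner c (s2.drop j0) (prev.drop j0) v := by
  intro fuel
  induction fuel with
  | zero =>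
    intro j0 done rest v hfuel hj0 hdone hrest hlast
    have hj0e : j0 = s2.length := by omega
    subst hj0e
    rw [PySem.List.pyRange_one_eq_nil (by push_cast; omega), List.foldl_nil,
        List.drop_length]
    have hrest0 : rest = [] := List.eq_nil_of_length_eq_zero (by omega)
    cases hpd : prev.drop s2.length <;> simp [bInner, hrest0]
  | succ fuel ih =>
    intro j0 done rest v hfuel hj0 hdone hrest hlast
    have hj0n : j0 < s2.length := by omega
    have hcons : PySem.List.pyRange ((j0:Int)+1) ((s2.length:Int)+1) 1
        = ((j0:Int)+1) :: PySem.List.pyRange ((j0:Int)+1+1) ((s2.length:Int)+1) 1 :=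
      PySem.List.pyRange_one_cons (by push_cast; omega)
    rw [hcons, List.foldl_cons]
    obtain ⟨r, rest', hre⟩ : ∃ r rest', rest = r :: rest' := by
      cases rest with
      | nil => simp at hrest; omega
      | cons a b => exact ⟨a, b, rfl⟩
    subst hre
    have e1 : ((j0:Int) + 1 - 1) = ((j0:Nat):Int) := by ring
    have e2 : ((j0:Int) + 1) = (((j0+1:Nat)):Int) := by push_cast; ring
    have hs2v : PySem.List.pyGetD s2 ((j0:Int)+1-1) ' ' = s2[j0] := by
      rw [e1, PySem.List.pyGetD_natCast, List.getD_eq_getElem _ _ hj0n]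
    have hprev_len : j0 < prev.length := by omega
    have hprev_len2 : j0 + 1 < prev.length := by omega
    have hp1 : PySem.List.pyGetD prev ((j0:Int)+1-1) 0 = prev[j0] := by
      rw [e1, PySem.List.pyGetD_natCast, List.getD_eq_getElem _ _ hprev_len]
    have hp2 : PySem.List.pyGetD prev ((j0:Int)+1) 0 = prev[j0+1] := by
      rw [e2, PySem.List.pyGetD_natCast, List.getD_eq_getElem _ _ hprev_len2]
    have hdr : j0 < done.length := by omega
    have hdv : done[j0] = v := by
      have h9 := List.getLast?_eq_getElem? (l := done)
      rw [hlast, hdone] at h9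
      simp only [Nat.add_sub_cancel] at h9
      have h10 : done[j0]? = some done[j0] := List.getElem?_eq_getElem hdr
      rw [h10] at h9
      exact (Option.some_inj.mp h9.symm)
    have hcurrv : PySem.List.pyGetD (done ++ r :: rest') ((j0:Int)+1-1) 0 = v := by
      rw [e1, PySem.List.pyGetD_natCast,
          List.getD_eq_getElem _ _ (by simp; omega), List.getElem_append_left hdr, hdv]
    have hset : ∀ w : Int, PySem.List.pySetD (done ++ r :: rest') ((j0:Int)+1) w
        = done ++ w :: rest' := by
      intro w
      rw [e2]
      have hlt : j0 + 1 < (done ++ r :: rest').length := by simp; omega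
      have hidx : PySem.List.pyIdx? (done ++ r :: rest').length (((j0+1:Nat)):Int)
          = some (j0+1) := by
        unfold PySem.List.pyIdx?
        rw [if_pos (by positivity), if_pos (by exact_mod_cast hlt)]
        simp
      rw [show PySem.List.pySetD (done ++ r :: rest') ((((j0+1:Nat)):Int)) w
            = (done ++ r :: rest').set (j0+1) w from by
        unfold PySem.List.pySetD PySem.List.pySet?
        rw [hidx]
        simp]
      rw [List.set_append, if_neg (by omega), hdone]
      simp
    have hs2d : s2.drop j0 = s2[j0] :: s2.drop (j0+1) := List.drop_eq_getElem_cons hj0n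
    have hpd1 : prev.drop j0 = prev[j0] :: prev.drop (j0+1) := List.drop_eq_getElem_cons hprev_len
    have hpd2 : prev.drop (j0+1) = prev[j0+1] :: prev.drop (j0+2) := List.drop_eq_getElem_cons hprev_len2
    rw [hs2d, hpd1, hpd2, bInner]
    simp only [hs2v, hp1, hp2, hcurrv]
    by_cases hcc : c = s2[j0]
    · rw [if_pos (by rw [hc]; exact hcc), if_pos hcc, hset]
      have hih := ih (j0+1) (done ++ [prev[j0]]) rest' prev[j0] (by omega) (by omega)
        (by simp [hdone]) (by simp at hrest ⊢; omega) (by simp)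
      rw [hpd2] at hih
      push_cast at hih ⊢
      simpa using hih
    · rw [if_neg (by rw [hc]; exact hcc), if_neg hcc, hset]
      have hih := ih (j0+1) (done ++ [1 + min v (min prev[j0+1] prev[j0])]) rest'
        (1 + min v (min prev[j0+1] prev[j0])) (by omega) (by omega)
        (by simp [hdone]) (by simp at hrest ⊢; omega) (by simp)
      rw [hpd2] at hih
      push_cast at hih ⊢
      simpa using hih

lemma innerA_full (c : Char) (s1 s2 : List Char) (i : Int) (prev curr : List Int)
    (hc : PySem.List.pyGetD s1 (i - 1) ' ' = c) (hp : prev.length = s2.length + 1)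
    (hcur : curr.length = s2.length + 1) (hi : i = prev.headD 0 + 1) :
    (PySem.List.pyRange 1 ((s2.length : Int) + 1) 1).foldl
      (fun curr j =>
        if PySem.List.pyGetD s1 (i - 1) ' ' = PySem.List.pyGetD s2 (j - 1) ' ' then
          PySem.List.pySetD curr j (PySem.List.pyGetD prev (j - 1) 0)
        else
          PySem.List.pySetD curr j (1 + min (PySem.List.pyGetD curr (j - 1) 0)
            (min (PySem.List.pyGetD prev j 0) (PySem.List.pyGetD prev (j - 1) 0))))
      (PySem.List.pySetD curr 0 i)
    = bStep c s2 prev := by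
  obtain ⟨x, curr', hce⟩ : ∃ x curr', curr = x :: curr' := by
    cases curr with
    | nil => simp at hcur
    | cons a b => exact ⟨a, b, rfl⟩
  subst hce
  have hset0 : PySem.List.pySetD (x :: curr') 0 i = i :: curr' := by
    simp [PySem.List.pySetD, PySem.List.pySet?, PySem.List.pyIdx?]
  rw [hset0]
  have h0 := innerA_gen c s1 s2 i prev hc hp s2.length 0 [i] curr' i rfl (by omega)
    (by simp) (by simp at hcur; omega) (by simp)
  push_cast at h0
  simp only [List.singleton_append, List.drop_zero] at h0
  rw [h0, bStep, hi]

-- ---- A's outer loop computes frow ----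
lemma outerA_gen (s1 s2 : List Char) :
    ∀ (fuel k0 : Nat) (curr : List Int), fuel = s1.length - k0 → k0 < s1.length →
      curr.length = s2.length + 1 →
      (PySem.List.pyRange ((k0 : Int) + 1) ((s1.length : Int) + 1) 1).foldl
        (fun (pc : List Int × List Int) i =>
          let prev := pc.1
          let curr := PySem.List.pySetD pc.2 0 i
          let curr := (PySem.List.pyRange 1 ((s2.length : Int) + 1) 1).foldl (fun curr j =>
            if PySem.List.pyGetD s1 (i - 1) ' ' = PySem.List.pyGetD s2 (j - 1) ' ' then
              PySem.List.pySetD curr j (PySem.List.pyGetD prev (j - 1) 0)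
            else
              PySem.List.pySetD curr j (1 + min (PySem.List.pyGetD curr (j - 1) 0)
                (min (PySem.List.pyGetD prev j 0) (PySem.List.pyGetD prev (j - 1) 0)))) curr
          (curr, curr)) (frow (s1.take k0) s2, curr)
      = (frow s1 s2, frow s1 s2) := by
  intro fuel
  induction fuel with
  | zero => intro k0 curr hfuel hk0 _; omega
  | succ fuel ih =>
    intro k0 curr hfuel hk0 hcur
    have hcons : PySem.List.pyRange ((k0:Int)+1) ((s1.length:Int)+1) 1
        = ((k0:Int)+1) :: PySem.List.pyRange ((k0:Int)+1+1) ((s1.length:Int)+1) 1 :=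
      PySem.List.pyRange_one_cons (by push_cast; omega)
    rw [hcons, List.foldl_cons]
    have hc : PySem.List.pyGetD s1 ((k0:Int)+1-1) ' ' = s1[k0] := by
      rw [show ((k0:Int)+1-1) = ((k0:Nat):Int) from by ring,
          PySem.List.pyGetD_natCast, List.getD_eq_getElem _ _ hk0]
    have hpl : (frow (s1.take k0) s2).length = s2.length + 1 := frow_length _ _
    have hhd : ((k0:Int)+1) = (frow (s1.take k0) s2).headD 0 + 1 := by
      rw [frow_headD]
      simp [List.length_take, Nat.min_eq_left (le_of_lt hk0)]
    have hinner := innerA_full s1[k0] s1 s2 ((k0:Int)+1) (frow (s1.take k0) s2) curr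
      hc hpl hcur hhd
    simp only [] at hinner ⊢
    rw [hinner, ← frow_take_succ s1 s2 k0 hk0]
    by_cases hend : k0 + 1 = s1.length
    · rw [PySem.List.pyRange_one_eq_nil (a := (k0:Int)+1+1) (b := (s1.length:Int)+1)
          (by push_cast; omega), List.foldl_nil, hend, List.take_length]
    · have hih := ih (k0+1) (frow (s1.take (k0+1)) s2) (by omega) (by omega) (frow_length _ _)
      push_cast at hih
      exact hih

lemma levA_eq (str1 str2 : String) (h : str1.toList ≠ []) :
    levenshtein_distance str1 str2
      = (frow str1.toList str2.toList).getD str2.toList.length 0 := by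
  unfold levenshtein_distance
  have hlen : 0 < str1.toList.length := List.length_pos_iff.mpr h
  have hcur : (List.replicate ((str2.toList.length : Int) + 1).toNat (0:Int)).length
      = str2.toList.length + 1 := by
    rw [List.length_replicate]; omega
  have h0 := outerA_gen str1.toList str2.toList str1.toList.length 0
    (List.replicate ((str2.toList.length : Int) + 1).toNat (0:Int)) (by omega) hlen hcur
  push_cast at h0
  simp only [List.take_zero] at h0
  rw [show frow [] str2.toList = PySem.List.pyRange 0 ((str2.toList.length : Int) + 1) 1 from rfl]
    at h0
  simp only []
  rw [h0, PySem.List.pyGetD_natCast]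

lemma levA_nil (str1 str2 : String) (h : str1.toList = []) :
    levenshtein_distance str1 str2 = 0 := by
  unfold levenshtein_distance
  rw [h]
  simp [PySem.List.pyGetD_natCast]

-- ---- B's banded rows vs the full DP rows: the cap/band invariant ----
-- BRel k i j vb vt: banded cell vb agrees with the true cell vt whenever vt ≤ k and is
-- itself > k whenever vt > k; vt is bounded below by |i - j| (needed at out-of-band cells)
def BRel (k i j vb vt : Int) : Prop :=
  (vt ≤ k → vb = vt) ∧ (k < vt → k < vb) ∧ i - j ≤ vt ∧ j - i ≤ vt

-- BRelRow k i j bs ts: bs and ts are elementwise BRel-related, positions j, j+1, …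
def BRelRow (k i : Int) : Int → List Int → List Int → Prop
  | _, [], [] => True
  | j, vb :: bs, vt :: ts => BRel k i j vb vt ∧ BRelRow k i (j + 1) bs ts
  | _, _, _ => False

lemma bandInner_rel (k : Int) (c1 : Char) (i : Int) :
    ∀ (ts : List Char) (j : Int) (prevb prevt : List Int) (lastb lastt : Int),
      prevt.length = ts.length + 1 →
      BRelRow k (i - 1) (j - 1) prevb prevt →
      BRel k i (j - 1) lastb lastt →
      BRelRow k i j (bandInner k c1 i ts j prevb lastb) (bInner c1 ts prevt lastt) := by
  intro ts
  induction ts with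
  | nil =>
    intro j prevb prevt lastb lastt hlt hprev _
    match prevt, prevb, hprev with
    | [d], [d'], _ => simp [bandInner, bInner, BRelRow]
  | cons c2 ts ih =>
    intro j prevb prevt lastb lastt hlt hprev hlast
    match prevt, prevb, hprev with
    | dt :: ut :: rt, db :: ub :: rb, ⟨hd, hu, hrest⟩ =>
      have hu' : BRel k (i-1) (j - 1 + 1) ub ut := hu
      rw [show j - 1 + 1 = j from by ring] at hu'
      have hhead : BRel k i j
          (if k < (((i - j).natAbs : Nat) : Int) then k + 1
           else if c1 = c2 then db else 1 + min lastb (min ub db))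
          (if c1 = c2 then dt else 1 + min lastt (min ut dt)) := by
        obtain ⟨hd1, hd2, hd3, hd4⟩ := hd
        obtain ⟨hu1, hu2, hu3, hu4⟩ := hu'
        obtain ⟨hl1, hl2, hl3, hl4⟩ := hlast
        unfold BRel
        by_cases hband : k < (((i - j).natAbs : Nat) : Int) <;>
          by_cases hc : c1 = c2 <;> simp only [hband, hc, if_pos, if_neg, if_true, if_false] <;>
          omega
      show BRelRow k i j (_ :: _) (_ :: _)
      refine ⟨hhead, ?_⟩
      have hrest' : BRelRow k (i - 1) (j + 1) rb rt := by
        rw [show j + 1 = j - 1 + 1 + 1 from by ring]; exact hrest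
      have := ih (j + 1) (ub :: rb) (ut :: rt) _ _ (by simpa using hlt)
        (by rw [show j + 1 - 1 = j from by ring]; exact ⟨hu', hrest'⟩)
        (by rw [show j + 1 - 1 = j from by ring]; exact hhead)
      simpa [bandInner, bInner] using this

lemma bandStep_rel (k : Int) (c1 : Char) (i : Int) (t : List Char) (prevb prevt : List Int)
    (hlt : prevt.length = t.length + 1) (hhd : prevt.headD 0 = i - 1) (hi : 1 ≤ i)
    (hprev : BRelRow k (i - 1) 0 prevb prevt) :
    BRelRow k i 0 (bandStep k c1 i t prevb) (bStep c1 t prevt) := by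
  have hh : BRel k i 0 (if i ≤ k then i else k + 1) (prevt.headD 0 + 1) := by
    rw [hhd]
    unfold BRel
    by_cases hik : i ≤ k <;> simp only [hik, if_pos, if_neg, if_true, if_false] <;> omega
  show BRelRow k i 0 (_ :: _) (_ :: _)
  refine ⟨hh, ?_⟩
  have := bandInner_rel k c1 i t 1 prevb prevt (if i ≤ k then i else k + 1)
    (prevt.headD 0 + 1) hlt
    (by rw [show (1:Int) - 1 = 0 from by ring]; exact hprev)
    (by rw [show (1:Int) - 1 = 0 from by ring]; exact hh)
  simpa [bandStep] using this

lemma bandLoop_rel (k : Int) (t : List Char) :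
    ∀ (s : List Char) (i : Int) (rowb rowt : List Int),
      rowt.length = t.length + 1 → rowt.headD 0 = i - 1 → 1 ≤ i →
      BRelRow k (i - 1) 0 rowb rowt →
      BRelRow k (i - 1 + s.length) 0 (bandLoop k t s i rowb)
        (s.foldl (fun r c => bStep c t r) rowt) := by
  intro s
  induction s with
  | nil =>
    intro i rowb rowt _ _ _ h
    simpa using h
  | cons c s ih =>
    intro i rowb rowt hlen hhd hi h
    have hstep := bandStep_rel k c i t rowb rowt hlen hhd hi h
    have hlen' : (bStep c t rowt).length = t.length + 1 := bStep_length c t rowt hlen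
    have hhd' : (bStep c t rowt).headD 0 = (i + 1) - 1 := by
      show rowt.headD 0 + 1 = i + 1 - 1
      rw [hhd]; ring
    have := ih (i + 1) (bandStep k c i t rowb) (bStep c t rowt) hlen' hhd' (by omega)
      (by rw [show i + 1 - 1 = i from by ring]; exact hstep)
    rw [show i + 1 - 1 = i from by ring] at this
    rw [show i - 1 + ((c :: s).length : Int) = i + (s.length : Int) from by
      simp only [List.length_cons]; push_cast; ring]
    simpa [bandLoop] using this

lemma row0_rel (k : Int) : ∀ (m : Nat) (j : Int), 0 ≤ j →
    BRelRow k 0 j ((PySem.List.pyRange j (j + m) 1).map (fun x => min x (k + 1)))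
      (PySem.List.pyRange j (j + m) 1) := by
  intro m
  induction m with
  | zero =>
    intro j _
    rw [PySem.List.pyRange_one_eq_nil (by omega)]
    simp [BRelRow]
  | succ m ih =>
    intro j hj
    rw [PySem.List.pyRange_one_cons (by push_cast; omega), List.map_cons]
    refine ⟨?_, ?_⟩
    · show BRel k 0 j (min j (k + 1)) j
      unfold BRel
      omega
    · have := ih (j + 1) (by omega)
      rw [show j + 1 + (m : Int) = j + ((m + 1 : Nat) : Int) from by push_cast; ring] at this
      exact this

lemma RelRow_getD (k i : Int) :
    ∀ (ts bs : List Int) (j : Int), BRelRow k i j bs ts →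
      ∀ idx : Nat, idx < ts.length → BRel k i (j + idx) (bs.getD idx 0) (ts.getD idx 0) := by
  intro ts
  induction ts with
  | nil => intro bs j _ idx h; simp at h
  | cons vt ts ih =>
    intro bs j hrel idx hidx
    cases bs with
    | nil => exact absurd hrel (by simp [BRelRow])
    | cons vb bs =>
      obtain ⟨h1, h2⟩ := hrel
      cases idx with
      | zero => simpa using h1
      | succ idx =>
        have := ih bs (j + 1) h2 idx (by simpa using hidx)
        rw [show j + 1 + (idx : Int) = j + ((idx + 1 : Nat) : Int) from by push_cast; ring] at this
        simpa using this

lemma banded_spec (s t : List Char) (k : Int) :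
    bandedDistance s t k
      = if (frow s t).getD t.length 0 ≤ k then some ((frow s t).getD t.length 0) else none := by
  have hr0len : (PySem.List.pyRange 0 ((t.length : Int) + 1) 1).length = t.length + 1 := by
    simp [PySem.List.length_pyRange_one]
  have hr0hd : (PySem.List.pyRange 0 ((t.length : Int) + 1) 1).headD 0 = 0 := by
    rw [PySem.List.pyRange_one_cons (by positivity)]; simp
  have h00 : BRelRow k 0 0
      ((PySem.List.pyRange 0 ((t.length : Int) + 1) 1).map (fun x => min x (k + 1)))
      (PySem.List.pyRange 0 ((t.length : Int) + 1) 1) := by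
    have := row0_rel k (t.length + 1) 0 le_rfl
    rw [show (0:Int) + ((t.length + 1 : Nat) : Int) = (t.length : Int) + 1 from by push_cast; ring]
      at this
    exact this
  have hloop := bandLoop_rel k t s 1
    ((PySem.List.pyRange 0 ((t.length : Int) + 1) 1).map (fun x => min x (k + 1)))
    (PySem.List.pyRange 0 ((t.length : Int) + 1) 1) hr0len (by rw [hr0hd]; ring) le_rfl
    (by rw [show (1:Int) - 1 = 0 from by ring]; exact h00)
  rw [show (1:Int) - 1 + (s.length : Int) = (s.length : Int) from by ring] at hloop
  have hflen : (s.foldl (fun r c => bStep c t r) (PySem.List.pyRange 0 ((t.length : Int) + 1) 1)).length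
      = t.length + 1 := foldl_bStep_length t s _ hr0len
  have hfin := RelRow_getD k (s.length) _ _ 0 hloop t.length (by rw [hflen]; omega)
  rw [show (0:Int) + (t.length : Int) = (t.length : Int) from by ring] at hfin
  obtain ⟨hf1, hf2, hf3, hf4⟩ := hfin
  have hfr : (frow s t) = s.foldl (fun r c => bStep c t r) (PySem.List.pyRange 0 ((t.length : Int) + 1) 1) := rfl
  unfold bandedDistance
  by_cases hpre : k < ((((s.length : Int) - (t.length : Int)).natAbs : Nat) : Int)
  · rw [if_pos hpre, hfr]
    rw [if_neg (by omega)]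
  · rw [if_neg hpre]
    simp only [PySem.List.pyGetD_natCast]
    rw [hfr]
    by_cases hle : (s.foldl (fun r c => bStep c t r) (PySem.List.pyRange 0 ((t.length : Int) + 1) 1)).getD t.length 0 ≤ k
    · rw [if_pos hle, if_pos (by rw [hf1 hle]; exact hle), hf1 hle]
    · rw [if_neg hle, if_neg (by have := hf2 (by omega); omega)]

-- ---- dict / sort helper lemmas ----
lemma getD_foldl_insert_fn (f : String → Int) :
    ∀ (l : List String) (d : PySem.Dict String Int) (c : String),
      (l.foldl (fun d x => d.insert x (f x)) d).getD c 0
        = if c ∈ l then f c else d.getD c 0 := by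
  intro l
  induction l with
  | nil => intro d c; simp
  | cons x l ih =>
    intro d c
    rw [List.foldl_cons, ih]
    by_cases hcl : c ∈ l
    · simp [hcl]
    · by_cases hcx : c = x <;> simp [hcl, hcx, PySem.Dict.getD_insert]

lemma insertBy_congr {α : Type} (k1 k2 : α → Int) :
    ∀ (ys : List α) (x : α), k1 x = k2 x → (∀ y ∈ ys, k1 y = k2 y) →
      PySem.List.insertBy (fun a b => decide (k1 a < k1 b)) x ys
        = PySem.List.insertBy (fun a b => decide (k2 a < k2 b)) x ys := by
  intro ys
  induction ys with
  | nil => intro x _ _; rfl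
  | cons y ys ih =>
    intro x hx hys
    rw [PySem.List.insertBy, PySem.List.insertBy, hx, hys y (by simp)]
    split <;> simp
    exact ih x hx (fun y hy => hys y (by simp [hy]))

lemma sorted_congr {α : Type} (k1 k2 : α → Int) (xs : List α)
    (h : ∀ x ∈ xs, k1 x = k2 x) :
    PySem.List.sorted xs k1 false = PySem.List.sorted xs k2 false := by
  rw [PySem.List.sorted_eq_foldl_insertBy, PySem.List.sorted_eq_foldl_insertBy]
  have aux : ∀ (l : List α) (acc : List α), (∀ x ∈ l, k1 x = k2 x) → (∀ x ∈ acc, k1 x = k2 x) →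
      l.foldl (fun acc x => PySem.List.insertBy (fun a b => decide (k1 a < k1 b)) x acc) acc
      = l.foldl (fun acc x => PySem.List.insertBy (fun a b => decide (k2 a < k2 b)) x acc) acc := by
    intro l
    induction l with
    | nil => intro acc _ _; rfl
    | cons x l ih =>
      intro acc hl hacc
      rw [List.foldl_cons, List.foldl_cons, insertBy_congr k1 k2 acc x (hl x (by simp)) hacc]
      exact ih _ (fun y hy => hl y (by simp [hy]))
        (fun y hy => by
          rcases (PySem.List.mem_insertBy _ x y acc).mp hy with h1 | h1
          · exact h1 ▸ hl x (by simp)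
          · exact hacc y h1)
  exact aux xs [] h (by simp)

-- A's whole pipeline as a filter + stable sort over the deduplicated columns
lemma A_pipeline (cn : String) (cols : List String) (k : Int) :
    find_closest_column_names cn cols k
      = PySem.List.sorted
          ((PySem.List.dedup cols).filter
            (fun c => decide (levenshtein_distance (PySem.Str.lower cn) (PySem.Str.lower c) ≤ k)))
          (fun c => levenshtein_distance (PySem.Str.lower cn) (PySem.Str.lower c)) false := by
  unfold find_closest_column_names
  dsimp only
  set dm := cols.foldl (fun d col =>
    d.insert col (levenshtein_distance (PySem.Str.lower cn) (PySem.Str.lower col)))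
    PySem.Dict.empty with hdm
  have hnodup : dm.keys.Nodup := by
    rw [hdm]
    exact PySem.Dict.nodup_keys_foldl_insert cols _ _ PySem.Dict.nodup_keys_empty
  have hkeys : dm.keys = PySem.List.dedup cols := by
    rw [hdm, PySem.Dict.keys_foldl_insert cols
      (fun _ col => levenshtein_distance (PySem.Str.lower cn) (PySem.Str.lower col))
      PySem.Dict.empty, PySem.Dict.keys_empty, PySem.List.dedup_eq_ofList]
    rfl
  have hgd : ∀ c ∈ PySem.List.dedup cols,
      dm.getD c 0 = levenshtein_distance (PySem.Str.lower cn) (PySem.Str.lower c) := by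
    intro c hc
    rw [hdm, getD_foldl_insert_fn
      (fun c => levenshtein_distance (PySem.Str.lower cn) (PySem.Str.lower c)) cols
      PySem.Dict.empty c, if_pos ((PySem.List.mem_dedup cols c).mp hc)]
  rw [PySem.Dict.items_eq_map_keys dm hnodup 0, hkeys, List.filter_map, List.map_map]
  rw [show ((fun (p : String × Int) => p.1) ∘ fun c => (c, dm.getD c 0)) = id from rfl,
      List.map_id]
  rw [show ((fun (p : String × Int) => decide (p.2 ≤ k)) ∘ fun c => (c, dm.getD c 0))
        = fun c => decide (dm.getD c 0 ≤ k) from rfl]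
  rw [List.filter_congr (fun c hc => by rw [hgd c hc])]
  exact sorted_congr _ _ _ (fun c hc => hgd c (List.mem_of_mem_filter hc))

-- ---- bucket assembly = stable sort by key ----
lemma insertBy_append_of_not {α : Type} (before : α → α → Bool) (x : α) :
    ∀ (P Q : List α), (∀ y ∈ P, before x y = false) →
      PySem.List.insertBy before x (P ++ Q) = P ++ PySem.List.insertBy before x Q := by
  intro P
  induction P with
  | nil => intro Q _; simp
  | cons y P ih =>
    intro Q h
    rw [List.cons_append, PySem.List.insertBy, h y (by simp), ih Q (fun z hz => h z (by simp [hz]))]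
    simp

lemma insertBy_all_lt {α : Type} (before : α → α → Bool) (x : α) :
    ∀ (Q : List α), (∀ y ∈ Q, before x y = true) →
      PySem.List.insertBy before x Q = x :: Q := by
  intro Q h
  cases Q with
  | nil => rfl
  | cons y Q => rw [PySem.List.insertBy, h y (by simp)]; simp

lemma sorted_split_mem : ∀ (ks : List Int) (v : Int), ks.Pairwise (· < ·) → v ∈ ks →
    ks = ks.filter (fun a => decide (a < v)) ++ v :: ks.filter (fun a => decide (v < a)) := by
  intro ks
  induction ks with
  | nil => intro v _ h; simp at h
  | cons a ks ih =>
    intro v hpw hv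
    obtain ⟨ha, hpw'⟩ := List.pairwise_cons.mp hpw
    rcases lt_trichotomy a v with h1 | h1 | h1
    · have hv' : v ∈ ks := by
        rcases List.mem_cons.mp hv with h | h
        · omega
        · exact h
      rw [List.filter_cons, if_pos (by simpa using h1), List.filter_cons,
        if_neg (by simp; omega)]
      rw [List.cons_append]
      exact congrArg (a :: ·) (ih v hpw' hv')
    · subst h1
      rw [List.filter_cons, if_neg (by simp), List.filter_cons, if_neg (by simp)]
      have h2 : ks.filter (fun x => decide (a < x)) = ks :=
        List.filter_eq_self.mpr (fun b hb => by simpa using ha b hb)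
      have h3 : ks.filter (fun x => decide (x < a)) = [] :=
        List.filter_eq_nil_iff.mpr (fun b hb => by have := ha b hb; simp; omega)
      rw [h2, h3]
      simp
    · exfalso
      rcases List.mem_cons.mp hv with h | h
      · omega
      · have := ha v h; omega

lemma sorted_split_not : ∀ (ks : List Int) (v : Int), ks.Pairwise (· < ·) → v ∉ ks →
    ks = ks.filter (fun a => decide (a < v)) ++ ks.filter (fun a => decide (v < a)) := by
  intro ks
  induction ks with
  | nil => intro v _ _; simp
  | cons a ks ih =>
    intro v hpw hv
    obtain ⟨ha, hpw'⟩ := List.pairwise_cons.mp hpw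
    have hav : a ≠ v := fun h => hv (by simp [h])
    rcases lt_trichotomy a v with h1 | h1 | h1
    · rw [List.filter_cons, if_pos (by simpa using h1), List.filter_cons,
        if_neg (by simp; omega), List.cons_append]
      exact congrArg (a :: ·) (ih v hpw' (fun h => hv (by simp [h])))
    · exact absurd h1 hav
    · rw [List.filter_cons, if_neg (by simp; omega), List.filter_cons, if_pos (by simpa using h1)]
      have h2 : ks.filter (fun x => decide (x < v)) = [] :=
        List.filter_eq_nil_iff.mpr (fun b hb => by have := ha b hb; simp; omega)
      have h3 : ks.filter (fun x => decide (v < x)) = ks :=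
        List.filter_eq_self.mpr (fun b hb => by have := ha b hb; simp; omega)
      rw [h2, h3]
      simp

lemma sorted_ofList_append (xs : List Int) (v : Int) :
    PySem.List.sorted (PySem.Set.ofList (xs ++ [v])) (fun x => x) false
      = (PySem.List.sorted (PySem.Set.ofList xs) (fun x => x) false).filter (fun a => decide (a < v))
        ++ v :: (PySem.List.sorted (PySem.Set.ofList xs) (fun x => x) false).filter
            (fun a => decide (v < a)) := by
  have hpw : (PySem.List.sorted (PySem.Set.ofList xs) (fun x => x) false).Pairwise (· < ·) :=
    PySem.List.sorted_ofList_pairwise_lt xs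
  have hofl : PySem.Set.ofList (xs ++ [v]) = PySem.Set.add (PySem.Set.ofList xs) v := by
    rw [PySem.Set.ofList_eq_foldl, PySem.Set.ofList_eq_foldl, List.foldl_append]
    rfl
  by_cases hv : v ∈ PySem.Set.ofList xs
  · have hadd : PySem.Set.add (PySem.Set.ofList xs) v = PySem.Set.ofList xs := by
      show (if PySem.Set.contains (PySem.Set.ofList xs) v then PySem.Set.ofList xs
            else PySem.Set.ofList xs ++ [v]) = PySem.Set.ofList xs
      rw [if_pos (by simpa [PySem.Set.contains] using List.elem_eq_true_of_mem hv)]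
    rw [hofl, hadd]
    exact sorted_split_mem _ v hpw ((PySem.List.mem_sorted _ _ _ v).mpr hv)
  · have hadd : PySem.Set.add (PySem.Set.ofList xs) v = PySem.Set.ofList xs ++ [v] := by
      show (if PySem.Set.contains (PySem.Set.ofList xs) v then PySem.Set.ofList xs
            else PySem.Set.ofList xs ++ [v]) = PySem.Set.ofList xs ++ [v]
      rw [if_neg (by
        simp only [PySem.Set.contains]
        intro h
        exact hv (by simpa using h))]
    rw [hofl, hadd]
    apply PySem.List.sorted_eq_of_perm_of_pairwise_lt
    · have hsplit := sorted_split_not (PySem.List.sorted (PySem.Set.ofList xs) (fun x => x) false)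
        v hpw (fun h => hv ((PySem.List.mem_sorted _ _ _ v).mp h))
      refine (List.perm_middle).trans ?_
      rw [← hsplit]
      exact ((PySem.List.sorted_perm _ _ _).cons v).trans (List.perm_append_singleton v _).symm
    · apply List.pairwise_append.mpr
      refine ⟨hpw.filter _, ?_, ?_⟩
      · apply List.pairwise_cons.mpr
        refine ⟨fun b hb => by simpa using (List.of_mem_filter hb), hpw.filter _⟩
      · intro a ha b hb
        have h1 : a < v := by simpa using List.of_mem_filter ha
        rcases List.mem_cons.mp hb with h | h
        · omega
        · have h2 : v < b := by simpa using List.of_mem_filter h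
          omega

lemma bucket_flatten (f : String → Int) (L : List String) :
    (PySem.List.sorted (PySem.Set.ofList (L.map f)) (fun x => x) false).flatMap
        (fun d => L.filter (fun c => f c == d))
      = PySem.List.sorted L f false := by
  induction L using List.reverseRecOn with
  | nil => simp [PySem.Set.ofList, PySem.List.sorted]
  | append_singleton L x ih =>
    have hmap : (L ++ [x]).map f = L.map f ++ [f x] := by simp
    rw [hmap, sorted_ofList_append]
    set ks := PySem.List.sorted (PySem.Set.ofList (L.map f)) (fun x => x) false with hks
    have hpw : ks.Pairwise (· < ·) := PySem.List.sorted_ofList_pairwise_lt (L.map f)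
    set P := ks.filter (fun a => decide (a < f x)) with hP
    set S := ks.filter (fun a => decide (f x < a)) with hS
    have hbP : ∀ d ∈ P, (L ++ [x]).filter (fun c => f c == d) = L.filter (fun c => f c == d) := by
      intro d hd
      have : d < f x := by simpa using List.of_mem_filter hd
      rw [List.filter_append]
      have : ((([x] : List String)).filter (fun c => f c == d)) = [] := by
        simp only [List.filter_cons, List.filter_nil]
        rw [if_neg (by simp; omega)]
      rw [this, List.append_nil]
    have hbS : ∀ d ∈ S, (L ++ [x]).filter (fun c => f c == d) = L.filter (fun c => f c == d) := by
      intro d hd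
      have : f x < d := by simpa using List.of_mem_filter hd
      rw [List.filter_append]
      have : ((([x] : List String)).filter (fun c => f c == d)) = [] := by
        simp only [List.filter_cons, List.filter_nil]
        rw [if_neg (by simp; omega)]
      rw [this, List.append_nil]
    have hbv : (L ++ [x]).filter (fun c => f c == f x) = L.filter (fun c => f c == f x) ++ [x] := by
      rw [List.filter_append]
      congr 1
      simp only [List.filter_cons, List.filter_nil]
      rw [if_pos (by simp)]
    rw [List.flatMap_append, List.flatMap_cons, hbv,
      List.flatMap_congr hbP, List.flatMap_congr hbS]
    -- the old sorted list splits as P-buckets ++ bucket (f x) ++ S-buckets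
    have hid : P.flatMap (fun d => L.filter (fun c => f c == d))
        ++ (L.filter (fun c => f c == f x) ++ S.flatMap (fun d => L.filter (fun c => f c == d)))
        = PySem.List.sorted L f false := by
      rw [← ih]
      by_cases hv : f x ∈ PySem.Set.ofList (L.map f)
      · have h1 := sorted_split_mem ks (f x) hpw ((PySem.List.mem_sorted _ _ _ _).mpr hv)
        conv_rhs => rw [h1]
        rw [List.flatMap_append, List.flatMap_cons]
      · have hnil : L.filter (fun c => f c == f x) = [] := by
          apply List.filter_eq_nil_iff.mpr
          intro c hc hcv
          exact hv ((PySem.Set.mem_ofList _ _).mpr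
            (List.mem_map.mpr ⟨c, hc, by simpa using hcv⟩))
        have h1 := sorted_split_not ks (f x) hpw
          (fun h => hv ((PySem.List.mem_sorted _ _ _ _).mp h))
        conv_rhs => rw [h1]
        rw [List.flatMap_append, hnil]
        rw [hP, hS]
        simp
    -- RHS: stable sort of L ++ [x] is insertBy into the sorted L
    have hsor : PySem.List.sorted (L ++ [x]) f false
        = PySem.List.insertBy (fun a b => decide (f a < f b)) x (PySem.List.sorted L f false) := by
      rw [PySem.List.sorted_eq_foldl_insertBy, List.foldl_append,
        ← PySem.List.sorted_eq_foldl_insertBy]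
      simp
    rw [hsor, ← hid]
    set A1 := P.flatMap (fun d => L.filter (fun c => f c == d)) with hA1
    set A2 := S.flatMap (fun d => L.filter (fun c => f c == d)) with hA2
    set Bv := L.filter (fun c => f c == f x) with hBv
    have hnotP : ∀ y ∈ A1 ++ Bv, decide (f x < f y) = false := by
      rw [hA1, hBv]
      intro y hy
      rcases List.mem_append.mp hy with hy | hy
      · obtain ⟨d, hd, hyd⟩ := List.mem_flatMap.mp hy
        have h1 : f y = d := by simpa using List.of_mem_filter hyd
        have h2 : d < f x := by simpa using List.of_mem_filter hd
        simp; omega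
      · have h1 : f y = f x := by simpa using List.of_mem_filter hy
        simp; omega
    have hltS : ∀ y ∈ A2, decide (f x < f y) = true := by
      rw [hA2]
      intro y hy
      obtain ⟨d, hd, hyd⟩ := List.mem_flatMap.mp hy
      have h1 : f y = d := by simpa using List.of_mem_filter hyd
      have h2 : f x < d := by simpa using List.of_mem_filter hd
      simp; omega
    rw [show A1 ++ (Bv ++ A2) = (A1 ++ Bv) ++ A2 from (List.append_assoc _ _ _).symm,
      insertBy_append_of_not (fun a b => decide (f a < f b)) x (A1 ++ Bv) A2 hnotP,
      insertBy_all_lt (fun a b => decide (f a < f b)) x A2 hltS]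
    simp

-- ---- B's pipeline as a filter + stable sort over the deduplicated columns ----
def gB (cn c : String) : Int :=
  (frow (PySem.Str.lower cn).toList (PySem.Str.lower c).toList).getD
    (PySem.Str.lower c).toList.length 0

lemma B_pipeline (cn : String) (cols : List String) (k : Int) :
    find_closest_column_names_alt cn cols k
      = PySem.List.sorted ((PySem.List.dedup cols).filter (fun c => decide (gB cn c ≤ k)))
          (fun c => gB cn c) false := by
  unfold find_closest_column_names_alt
  dsimp only
  have hfun : (fun (b : PySem.Dict Int (List String)) col =>
      match bandedDistance (PySem.Str.lower cn).toList (PySem.Str.lower col).toList k with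
      | some d => b.modify d [] (fun l => l ++ [col])
      | none => b)
    = fun (b : PySem.Dict Int (List String)) col =>
        if (fun c => decide (gB cn c ≤ k)) col = true
        then b.modify (gB cn col) [] (fun l => l ++ [col]) else b := by
    funext b col
    rw [banded_spec]
    rw [show (frow (PySem.Str.lower cn).toList (PySem.Str.lower col).toList).getD
        (PySem.Str.lower col).toList.length 0 = gB cn col from rfl]
    by_cases h : gB cn col ≤ k <;> simp [h]
  rw [hfun, ← List.foldl_filter]
  set L := (PySem.List.dedup cols).filter (fun c => decide (gB cn c ≤ k)) with hL
  have hpairs : L.foldl (fun (b : PySem.Dict Int (List String)) c =>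
        b.modify (gB cn c) [] (fun l => l ++ [c])) PySem.Dict.empty
      = (L.map (fun c => (gB cn c, c))).foldl
          (fun (b : PySem.Dict Int (List String)) p => b.modify p.1 [] (fun l => l ++ [p.2]))
          PySem.Dict.empty := by
    rw [List.foldl_map]
  set buckets := L.foldl (fun (b : PySem.Dict Int (List String)) c =>
    b.modify (gB cn c) [] (fun l => l ++ [c])) PySem.Dict.empty with hbuckets
  have hgetD : ∀ d : Int, buckets.getD d [] = L.filter (fun c => gB cn c == d) := by
    intro d
    rw [hpairs, PySem.Dict.getD_foldl_modify_append, PySem.Dict.getD_empty,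
      List.nil_append, List.filter_map, List.map_map]
    have h1 : ((fun (p : Int × String) => p.1 == d) ∘ fun c => (gB cn c, c))
        = fun c => gB cn c == d := rfl
    have h2 : ((fun (p : Int × String) => p.2) ∘ fun c => (gB cn c, c)) = id := rfl
    rw [h1, h2, List.map_id]
  have hkeys : buckets.keys = PySem.Set.ofList (L.map (fun c => gB cn c)) := by
    rw [hbuckets, PySem.Dict.keys_foldl_modify_key L (fun c => gB cn c) []
      (fun _ c => fun l => l ++ [c]) PySem.Dict.empty, PySem.Dict.keys_empty,
      PySem.Set.ofList_eq_foldl]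
    rfl
  rw [PySem.List.foldl_append_eq_flatMap, List.nil_append, hkeys,
    List.flatMap_congr (fun d _ => hgetD d)]
  exact bucket_flatten (fun c => gB cn c) L

-- ---- assembly ----
lemma toList_nil_imp (s : String) (h : s.toList = []) : s = "" := by
  apply String.ext
  simpa [String.toList] using h

lemma lower_toList_nil_iff (s : String) : (PySem.Str.lower s).toList = [] ↔ s.toList = [] := by
  rw [PySem.Str.toList_lower]
  simp [PySem.Chars.lower]

lemma main_eq (column_name : String) (df_columns : List String) (max_distance : Int)
    (h : column_name.toList ≠ []) :
    find_closest_column_names column_name df_columns max_distance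
      = find_closest_column_names_alt column_name df_columns max_distance := by
  rw [A_pipeline, B_pipeline]
  have hg : ∀ c, gB column_name c
      = levenshtein_distance (PySem.Str.lower column_name) (PySem.Str.lower c) := by
    intro c
    exact (levA_eq _ _ (fun hc => h ((lower_toList_nil_iff column_name).mp hc))).symm
  simp only [hg]

lemma empty_A (df_columns : List String) (max_distance : Int) :
    find_closest_column_names "" df_columns max_distance
      = if 0 ≤ max_distance then PySem.List.dedup df_columns else [] := by
  rw [A_pipeline]
  have hF : ∀ c : String,
      levenshtein_distance (PySem.Str.lower "") (PySem.Str.lower c) = 0 := by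
    intro c
    exact levA_nil _ _ ((lower_toList_nil_iff "").mpr rfl)
  simp only [hF]
  by_cases h0 : (0:Int) ≤ max_distance
  · rw [if_pos h0,
      show (fun (_ : String) => decide ((0:Int) ≤ max_distance)) = fun _ => true from by
        funext c; simp [h0],
      List.filter_true]
    exact PySem.List.sorted_eq_self_of_pairwise _ _ (List.pairwise_of_forall (fun _ _ => le_refl (0:Int)))
  · rw [if_neg h0,
      show (fun (_ : String) => decide ((0:Int) ≤ max_distance)) = fun _ => false from by
        funext c; simp [h0],
      List.filter_false]
    exact (PySem.List.sorted_eq_nil_iff _ _ _).mpr rfl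

lemma empty_B (df_columns : List String) (max_distance : Int) :
    find_closest_column_names_alt "" df_columns max_distance
      = PySem.List.sorted
          ((PySem.List.dedup df_columns).filter
            (fun c => decide ((c.toList.length : Int) ≤ max_distance)))
          (fun c => (c.toList.length : Int)) false := by
  rw [B_pipeline]
  have hg : ∀ c : String, gB "" c = ((c.toList.length : Nat) : Int) := by
    intro c
    unfold gB
    have hlow : (PySem.Str.lower c).toList.length = c.toList.length := by
      rw [PySem.Str.toList_lower]
      simp [PySem.Chars.lower]
    have hfr : frow (PySem.Str.lower "").toList (PySem.Str.lower c).toList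
        = PySem.List.pyRange 0 (((PySem.Str.lower c).toList.length : Int) + 1) 1 := by
      rw [show (PySem.Str.lower "").toList = [] from (lower_toList_nil_iff "").mpr rfl]
      rfl
    rw [hfr]
    have hlt : (PySem.Str.lower c).toList.length
        < (PySem.List.pyRange 0 (((PySem.Str.lower c).toList.length : Int) + 1) 1).length := by
      rw [PySem.List.length_pyRange_one]; omega
    rw [List.getD_eq_getElem _ _ hlt, PySem.List.getElem_pyRange_one]
    rw [hlow]
    ring
  simp only [hg]

-- ===== VERDICT (by name: the statement is the Claim_ definition above) =====
theorem find_closest_column_names_spec : Claim_unchanged_find_closest_column_names := by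
  intro column_name df_columns max_distance _ hnd
  by_cases hcn : column_name = ""
  · subst hcn
    rw [empty_A, empty_B]
    by_cases h0 : (0:Int) ≤ max_distance
    · rw [if_pos h0]
      have hAP : ((PySem.List.dedup df_columns).all
            (fun c => decide ((c.toList.length : Int) ≤ max_distance))) = true ∧
          (PySem.List.dedup df_columns).Pairwise
            (fun a b => a.toList.length ≤ b.toList.length) := by
        by_contra hq
        exact hnd ⟨rfl, h0, hq⟩
      obtain ⟨hall, hpw⟩ := hAP
      rw [List.filter_eq_self.mpr (fun c hc => List.all_eq_true.mp hall c hc)]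
      exact (PySem.List.sorted_eq_self_of_pairwise _ _
        (hpw.imp (by intro a b hh; exact_mod_cast hh))).symm
    · rw [if_neg h0]
      rw [List.filter_eq_nil_iff.mpr (fun c hc => by simp; omega)]
      exact ((PySem.List.sorted_eq_nil_iff _ _ _).mpr rfl).symm
  · exact main_eq column_name df_columns max_distance
      (fun hc => hcn (toList_nil_imp column_name hc))

theorem find_closest_column_names_changed : Claim_changed_find_closest_column_names := by
  unfold Claim_changed_find_closest_column_names; decide

theorem find_closest_column_names_tight : Claim_exact_find_closest_column_names := by
  intro column_name df_columns max_distance _ hD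
  obtain ⟨hcn, h0, hnot⟩ := hD
  subst hcn
  rw [empty_A, empty_B, if_pos h0]
  intro heq
  by_cases hall : ((PySem.List.dedup df_columns).all
      (fun c => decide ((c.toList.length : Int) ≤ max_distance))) = true
  · have hpw : ¬ (PySem.List.dedup df_columns).Pairwise
        (fun a b => a.toList.length ≤ b.toList.length) := fun hp => hnot ⟨hall, hp⟩
    rw [List.filter_eq_self.mpr (fun c hc => List.all_eq_true.mp hall c hc)] at heq
    have hsp := PySem.List.sorted_pairwise (PySem.List.dedup df_columns)
      (fun c => ((c.toList.length : Nat) : Int))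
    rw [← heq] at hsp
    exact hpw (hsp.imp (by intro a b hh; exact_mod_cast hh))
  · have hex : ∃ c ∈ PySem.List.dedup df_columns,
        ¬ ((fun c => decide ((c.toList.length : Int) ≤ max_distance)) c = true) := by
      simpa using hall
    have hlt := List.length_filter_lt_length_iff_exists.mpr hex
    have hlen := congrArg List.length heq
    rw [PySem.List.length_sorted] at hlen
    omega
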